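-- pv_equiv track=rewrite | github.com/matheusaraujo/advent-of-code | 2019/day04/part1.py | meets_criteria
-- ===== SOURCE A (Python) =====
-- def meets_criteria(n):
--     n = str(n)
--     has_double = False
--     for i in range(len(n) - 1):
--         if n[i] > n[i + 1]:
--             return False
--         has_double = has_double or n[i] == n[i + 1]
--
--     return has_double
-- ===== SOURCE B (Python) =====
-- def meets_criteria(n):
--     s = str(n)
--     return list(s) == sorted(s) and any(a == b for a, b in zip(s, s[1:]))
-- ===== Notes on version B (the rewrite author's own statement) =====
-- stated objective: idiomatic
-- what changed: Replaces the single short-circuiting index loop carrying a has_double flag by two independent whole-string passes: non-decreasing order tested as list(s) == sorted(s) and the adjacent duplicate tested with any over zip(s, s[1:]).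
import Mathlib
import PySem

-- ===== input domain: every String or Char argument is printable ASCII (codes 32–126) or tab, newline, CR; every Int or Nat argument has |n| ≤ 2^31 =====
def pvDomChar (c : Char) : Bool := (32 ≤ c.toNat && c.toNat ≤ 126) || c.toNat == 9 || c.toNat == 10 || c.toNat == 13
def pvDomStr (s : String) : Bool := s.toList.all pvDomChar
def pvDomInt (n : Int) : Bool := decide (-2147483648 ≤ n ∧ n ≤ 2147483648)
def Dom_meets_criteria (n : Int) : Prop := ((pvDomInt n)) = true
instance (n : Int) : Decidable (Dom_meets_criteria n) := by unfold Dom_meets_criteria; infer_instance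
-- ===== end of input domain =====

-- B replaces A's single short-circuiting scan with a sort-then-compare pass plus an
-- independent adjacent-pair pass (more idiomatic; not claimed faster).

-- ===== PORT A =====
-- the 'for i in range(len(n) - 1)' loop with early return and the has_double accumulator
def pvLoopA : List Char → Bool → Bool
  | a :: b :: rest, hasDouble =>
      if a > b then false
      else pvLoopA (b :: rest) (hasDouble || (a == b))
  | _, hasDouble => hasDouble

def meets_criteria (n : Int) : Bool :=
  pvLoopA (PySem.Int.toStr n).toList false

-- ===== PORT B =====
def meets_criteria_alt (n : Int) : Bool :=
  let s := (PySem.Int.toStr n).toList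
  decide (s = PySem.List.sorted s (fun c => c) false)
    && (s.zip s.tail).any (fun p => p.1 == p.2)

-- ===== PRECONDITION & SPEC =====
def Spec_meets_criteria (n : Int) (out : Bool) : Prop := out = meets_criteria_alt n
instance (n : Int) (out : Bool) : Decidable (Spec_meets_criteria n out) := by unfold Spec_meets_criteria; infer_instance

-- ===== CLAIM (what is proved, stated in full; the proofs are below) =====
def Claim_equal_meets_criteria : Prop := ∀ (n : Int), Dom_meets_criteria n → Spec_meets_criteria n (meets_criteria n)

-- ===== LEMMAS AND PROOFS =====

-- boolean 'the list is non-decreasing at every adjacent pair'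
def pvChainB : List Char → Bool
  | a :: b :: rest => decide (a ≤ b) && pvChainB (b :: rest)
  | _ => true

-- boolean 'some adjacent pair is equal'
def pvAdjB : List Char → Bool
  | a :: b :: rest => (a == b) || pvAdjB (b :: rest)
  | _ => false

theorem pvLoopA_eq (s : List Char) : ∀ hd : Bool,
    pvLoopA s hd = (pvChainB s && (hd || pvAdjB s)) := by
  induction s with
  | nil => intro hd; simp [pvLoopA, pvChainB, pvAdjB]
  | cons a t ih =>
    intro hd
    cases t with
    | nil => simp [pvLoopA, pvChainB, pvAdjB]
    | cons b rest =>
      by_cases h : a > b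
      · have : ¬ a ≤ b := not_le.mpr h
        simp [pvLoopA, pvChainB, h, this]
      · have hle : a ≤ b := not_lt.mp h
        simp only [pvLoopA, if_neg h, ih, pvChainB, pvAdjB,
          hle, decide_true, Bool.true_and]
        cases hd <;> cases pvChainB (b :: rest) <;> simp

theorem pvChainB_iff_isChain (s : List Char) :
    pvChainB s = true ↔ List.IsChain (· ≤ ·) s := by
  induction s with
  | nil => simp [pvChainB]
  | cons a t ih =>
    cases t with
    | nil => simp [pvChainB]
    | cons b rest =>
      simp [pvChainB, List.isChain_cons_cons, ih]

theorem pvSorted_eq_chainB (s : List Char) :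
    decide (s = PySem.List.sorted s (fun c => c) false) = pvChainB s := by
  by_cases h : pvChainB s = true
  · have hp : s.Pairwise (fun a b : Char => a ≤ b) :=
      List.isChain_iff_pairwise.mp ((pvChainB_iff_isChain s).mp h)
    have he := PySem.List.sorted_eq_self_of_pairwise s (fun c : Char => c) hp
    simp [h, he]
  · have hne : s ≠ PySem.List.sorted s (fun c => c) false := by
      intro he
      apply h
      apply (pvChainB_iff_isChain s).mpr
      apply List.isChain_iff_pairwise.mpr
      have hp := PySem.List.sorted_pairwise s (fun c : Char => c)
      rw [← he] at hp
      exact hp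
    have hf : pvChainB s = false := by
      cases hcb : pvChainB s
      · rfl
      · exact absurd hcb h
    simp [hf, hne]

theorem pvZip_any_eq_adjB (s : List Char) :
    (s.zip s.tail).any (fun p => p.1 == p.2) = pvAdjB s := by
  induction s with
  | nil => simp [pvAdjB]
  | cons a t ih =>
    cases t with
    | nil => simp [pvAdjB]
    | cons b rest =>
      simp only [List.tail_cons, List.zip_cons_cons, List.any_cons, pvAdjB]
      rw [← ih]
      rfl

theorem pvAlt_def (n : Int) : meets_criteria_alt n =
    (decide ((PySem.Int.toStr n).toList
        = PySem.List.sorted (PySem.Int.toStr n).toList (fun c => c) false)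
      && (((PySem.Int.toStr n).toList).zip ((PySem.Int.toStr n).toList).tail).any
          (fun p => p.1 == p.2)) := rfl

-- ===== VERDICT (by name: the statement is the Claim_ definition above) =====
theorem meets_criteria_spec : Claim_equal_meets_criteria := by
  intro n _
  unfold Spec_meets_criteria meets_criteria
  rw [pvAlt_def, pvLoopA_eq, pvSorted_eq_chainB, pvZip_any_eq_adjB]
  simp
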